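-- pv_equiv track=rewrite | github.com/MortezaDamghaniNouri/Go-Game-Player-Agent | my_player3.py | two_eyes_points_remover
-- ===== SOURCE A (Python) =====
-- import copy
--
-- def is_in_groups(input_groups, input_element):
--     i = 0
--     while i < len(input_groups):
--         current_group = input_groups[i]
--         if input_element in current_group:
--             return True
--         i += 1
--     return False
--
-- def groups_finder(input_board, group_color):
--     groups = []
--     i = 0
--     board_size = len(input_board[0])
--     while i < board_size:
--         j = 0
--         while j < board_size:
--             if input_board[i][j] == group_color and (not is_in_groups(groups, [i, j])):
--                 frontier = [[i, j]]
--                 expanded = []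
--                 while True:
--                     m = frontier[0][0]
--                     n = frontier[0][1]
--                     frontier.pop(0)
--
--                     if (m + 1) < board_size and input_board[m + 1][n] == group_color and ([m + 1, n] not in frontier) and ([m + 1, n] not in expanded):
--                         frontier.append([m + 1, n])
--
--                     if (m - 1) >= 0 and input_board[m - 1][n] == group_color and ([m - 1, n] not in frontier) and ([m - 1, n] not in expanded):
--                         frontier.append([m - 1, n])
--
--                     if (n + 1) < board_size and input_board[m][n + 1] == group_color and ([m, n + 1] not in frontier) and ([m, n + 1] not in expanded):
--                         frontier.append([m, n + 1])
--
--                     if (n - 1) >= 0 and input_board[m][n - 1] == group_color and ([m, n - 1] not in frontier) and ([m, n - 1] not in expanded):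
--                         frontier.append([m, n - 1])
--
--                     expanded.append([m, n])
--                     if len(frontier) == 0:
--                         break
--
--                 groups.append(expanded)
--             j += 1
--         i += 1
--
--     return groups
--
-- def two_eyes_points_remover(input_list, input_my_stone_color, input_current_board):
--     if len(input_list) == 0:
--         return input_list
--     output_list = copy.deepcopy(input_list)
--     board_size = len(input_current_board[0])
--     groups = groups_finder(input_current_board, input_my_stone_color)
--     i = 0
--     while i < len(groups):
--         current_group = groups[i]
--         j = 0
--         empty_neighbors_of_the_group = []
--         while j < len(current_group):
--             current_member = current_group[j]
--             m = current_member[0]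
--             n = current_member[1]
--             if (m + 1) < board_size and input_current_board[m + 1][n] == 0 and [(m + 1), n] not in empty_neighbors_of_the_group:
--                 empty_neighbors_of_the_group.append([(m + 1), n])
--
--             if (m - 1) >= 0 and input_current_board[m - 1][n] == 0 and [(m - 1), n] not in empty_neighbors_of_the_group:
--                 empty_neighbors_of_the_group.append([(m - 1), n])
--
--             if (n + 1) < board_size and input_current_board[m][n + 1] == 0 and [m, (n + 1)] not in empty_neighbors_of_the_group:
--                 empty_neighbors_of_the_group.append([m, (n + 1)])
--
--             if (n - 1) >= 0 and input_current_board[m][n - 1] == 0 and [m, (n - 1)] not in empty_neighbors_of_the_group: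
--                 empty_neighbors_of_the_group.append([m, (n - 1)])
--
--             j += 1
--
--         if len(empty_neighbors_of_the_group) == 2:
--             output_list.remove(empty_neighbors_of_the_group[0])
--             output_list.remove(empty_neighbors_of_the_group[1])
--
--         i += 1
--
--     return output_list
-- ===== SOURCE B (Python) =====
-- def two_eyes_points_remover(input_list, input_my_stone_color, input_current_board):
--     if len(input_list) == 0:
--         return input_list
--     board = input_current_board
--     n = len(board[0])
--     color = input_my_stone_color
--     assigned = set()      # stones already accounted to some group
--     removals = []
--     for i in range(n):
--         for j in range(n):
--             if board[i][j] != color or (i, j) in assigned: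
--                 continue
--             # group of (i, j): saturate a set to its neighbour closure
--             # (no queue/frontier/expanded bookkeeping; whole-set fixpoint)
--             comp = {(i, j)}
--             while True:
--                 grown = comp | {
--                     (p, q)
--                     for (x, y) in comp
--                     for (p, q) in ((x + 1, y), (x - 1, y), (x, y + 1), (x, y - 1))
--                     if 0 <= p < n and 0 <= q < n and board[p][q] == color
--                 }
--                 if len(grown) == len(comp):
--                     break
--                 comp = grown
--             assigned |= comp
--             # the group's distinct empty neighbours, as one set comprehension
--             libs = {
--                 (p, q)
--                 for (x, y) in comp
--                 for (p, q) in ((x + 1, y), (x - 1, y), (x, y + 1), (x, y - 1))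
--                 if 0 <= p < n and 0 <= q < n and board[p][q] == 0
--             }
--             if len(libs) == 2:
--                 removals.extend(sorted(libs))
--     out = list(input_list)
--     for p, q in removals:
--         out.remove([p, q])
--     return out
-- ===== Notes on version B (the rewrite author's own statement) =====
-- stated objective: alternative
-- what changed: A grows each stone group with a worklist BFS (a frontier queue and an expanded list, membership tested by linear scans) and then re-walks the finished group appending its empty neighbours one by one with list-scan dedup, removing eyes pair by pair; …
import Mathlib
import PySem

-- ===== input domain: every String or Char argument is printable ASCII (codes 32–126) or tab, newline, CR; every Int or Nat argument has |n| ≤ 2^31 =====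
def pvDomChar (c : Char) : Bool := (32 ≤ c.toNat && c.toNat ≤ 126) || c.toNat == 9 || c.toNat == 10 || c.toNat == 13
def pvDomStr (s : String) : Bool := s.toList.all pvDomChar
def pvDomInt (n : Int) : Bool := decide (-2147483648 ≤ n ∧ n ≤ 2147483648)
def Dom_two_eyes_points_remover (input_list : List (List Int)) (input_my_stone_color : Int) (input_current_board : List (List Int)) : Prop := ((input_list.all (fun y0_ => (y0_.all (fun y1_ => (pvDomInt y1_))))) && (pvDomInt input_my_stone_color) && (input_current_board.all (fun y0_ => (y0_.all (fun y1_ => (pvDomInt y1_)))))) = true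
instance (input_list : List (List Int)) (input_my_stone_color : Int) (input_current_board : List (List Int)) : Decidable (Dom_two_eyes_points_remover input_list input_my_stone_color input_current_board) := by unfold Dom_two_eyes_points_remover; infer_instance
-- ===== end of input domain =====

-- B replaces A's worklist BFS (frontier/expanded lists with linear membership scans, then a
-- second per-group pass for empty neighbours) by whole-set fixpoint saturation per group, with
-- the liberties collected as one set and the removals sorted (removal order is irrelevant,
-- which the proof establishes).  Return-value equivalence only (neither side mutates arguments).

-- ===== PORT A =====
-- board access board[m][n]; out-of-range only reachable outside Pre_ (Python would raise IndexError)
def pvCell (bd : List (List Int)) (m n : Nat) : Int := (bd.getD m []).getD n 0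

-- 'if cond and x not in f and x not in e: f.append(x)' (A's guarded append; e = the second scanned list)
def pvPush (e f : List (Nat × Nat)) (x : Nat × Nat) (cond : Prop) [Decidable cond] : List (Nat × Nat) :=
  if cond ∧ x ∉ f ∧ x ∉ e then f ++ [x] else f

def pvIsInGroups (groups : List (List (Nat × Nat))) (e : Nat × Nat) : Bool :=
  groups.any (fun g => g.contains e)

-- the four conditional pushes of A's BFS iteration (frontier already popped to 'rest')
def pvStepA (bd : List (List Int)) (c : Int) (N : Nat) (m n : Nat)
    (rest e : List (Nat × Nat)) : List (Nat × Nat) :=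
  pvPush e
    (pvPush e
      (pvPush e
        (pvPush e rest (m+1, n) (m+1 < N ∧ pvCell bd (m+1) n = c))
        (m-1, n) (1 ≤ m ∧ pvCell bd (m-1) n = c))
      (m, n+1) (n+1 < N ∧ pvCell bd m (n+1) = c))
    (m, n-1) (1 ≤ n ∧ pvCell bd m (n-1) = c)

-- the 'while True' BFS of groups_finder (frontier queue, expanded list); the Nat
-- argument is a totality fuel only — callers pass enough for the loop to drain
-- (pvLoopA_stops below), so the fallback branches are never reached
def pvLoopA (bd : List (List Int)) (c : Int) (N : Nat) :
    Nat → List (Nat × Nat) → List (Nat × Nat) → List (Nat × Nat) × List (Nat × Nat)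
  | 0, f, e => (f, e)
  | _ + 1, [], e => ([], e)
  | fuel + 1, (m, n) :: rest, e =>
      pvLoopA bd c N fuel (pvStepA bd c N m n rest e) (e ++ [(m, n)])

-- one member's four conditional appends in the empty-neighbour scan (second phase)
def pvEyesStepA (bd : List (List Int)) (N : Nat) (acc : List (Nat × Nat)) (p : Nat × Nat) :
    List (Nat × Nat) :=
  pvPush []
    (pvPush []
      (pvPush []
        (pvPush [] acc (p.1+1, p.2) (p.1+1 < N ∧ pvCell bd (p.1+1) p.2 = 0))
        (p.1-1, p.2) (1 ≤ p.1 ∧ pvCell bd (p.1-1) p.2 = 0))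
      (p.1, p.2+1) (p.2+1 < N ∧ pvCell bd p.1 (p.2+1) = 0))
    (p.1, p.2-1) (1 ≤ p.2 ∧ pvCell bd p.1 (p.2-1) = 0)

def pvGroupsFinder (bd : List (List Int)) (c : Int) : List (List (Nat × Nat)) :=
  let N := (bd.headD []).length
  (List.range N).foldl (fun gs i =>
    (List.range N).foldl (fun gs j =>
      if pvCell bd i j = c ∧ pvIsInGroups gs (i, j) = false then
        gs ++ [(pvLoopA bd c N (5 * (N * N + 1)) [(i, j)] []).2]
      else gs) gs) []

-- 'output_list.remove(v)'; ValueError (value absent) is excluded by Pre_, getD keeps the list there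
def pvRem (l : List (List Int)) (v : List Int) : List (List Int) :=
  (PySem.List.remove? l v).getD l

def two_eyes_points_remover (input_list : List (List Int)) (input_my_stone_color : Int)
    (input_current_board : List (List Int)) : List (List Int) :=
  if input_list.length = 0 then input_list
  else
    let N := (input_current_board.headD []).length
    let groups := pvGroupsFinder input_current_board input_my_stone_color
    groups.foldl (fun out g =>
      let eyes := g.foldl (pvEyesStepA input_current_board N) []
      if eyes.length = 2 then
        let e0 := eyes.getD 0 (0, 0)
        let e1 := eyes.getD 1 (0, 0)
        pvRem (pvRem out [(e0.1 : Int), (e0.2 : Int)]) [(e1.1 : Int), (e1.2 : Int)]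
      else out) input_list

-- ===== PORT B =====
-- the in-bounds neighbours of (m, n), in Source B's generator order ('0 <= p < n and 0 <= q < n')
def pvNbrs (N m n : Nat) : List (Nat × Nat) :=
  (if m+1 < N ∧ n < N then [(m+1, n)] else []) ++
  (if 1 ≤ m ∧ m-1 < N ∧ n < N then [(m-1, n)] else []) ++   -- '0 <= m-1' over ℤ is '1 ≤ m' on ℕ
  (if m < N ∧ n+1 < N then [(m, n+1)] else []) ++
  (if m < N ∧ 1 ≤ n ∧ n-1 < N then [(m, n-1)] else [])

-- comp | {same-colour in-bounds neighbours of comp}   (a PySem.Set built onto comp)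
def pvGrow (bd : List (List Int)) (c : Int) (N : Nat) (comp : List (Nat × Nat)) :
    List (Nat × Nat) :=
  comp.foldl (fun s u =>
    (pvNbrs N u.1 u.2).foldl (fun s y =>
      if pvCell bd y.1 y.2 = c then PySem.Set.add s y else s) s) comp

-- Source B's 'while True: grown = …; if len(grown) == len(comp): break; comp = grown';
-- the Nat argument is a totality fuel only — N*N+1 always reaches the fixpoint
def pvSat (bd : List (List Int)) (c : Int) (N : Nat) :
    Nat → List (Nat × Nat) → List (Nat × Nat)
  | 0, comp => comp
  | fuel + 1, comp =>
      let grown := pvGrow bd c N comp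
      if grown.length = comp.length then comp else pvSat bd c N fuel grown

-- the group's distinct empty neighbours, as one set comprehension
def pvLibs (bd : List (List Int)) (N : Nat) (comp : List (Nat × Nat)) : List (Nat × Nat) :=
  comp.foldl (fun s u =>
    (pvNbrs N u.1 u.2).foldl (fun s y =>
      if pvCell bd y.1 y.2 = 0 then PySem.Set.add s y else s) s) []

-- body of Source B's scan at cell (i, j); state = (assigned set, removal list)
def pvSeedB (bd : List (List Int)) (c : Int) (N i j : Nat)
    (st : List (Nat × Nat) × List (Nat × Nat)) : List (Nat × Nat) × List (Nat × Nat) :=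
  if pvCell bd i j = c ∧ (i, j) ∉ st.1 then
    let comp := pvSat bd c N (N * N + 1) [(i, j)]
    let libs := pvLibs bd N comp
    (PySem.Set.update st.1 comp,
     if libs.length = 2 then
       st.2 ++ PySem.List.sorted2 libs (fun x => x.1) (fun x => x.2) false
     else st.2)
  else st

def two_eyes_points_remover_alt (input_list : List (List Int)) (input_my_stone_color : Int)
    (input_current_board : List (List Int)) : List (List Int) :=
  if input_list.length = 0 then input_list
  else
    let N := (input_current_board.headD []).length
    let st := (List.range N).foldl (fun st i =>
        (List.range N).foldl (fun st j =>
          pvSeedB input_current_board input_my_stone_color N i j st) st)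
      ([], [])
    st.2.foldl (fun out x => pvRem out [(x.1 : Int), (x.2 : Int)]) input_list

-- ===== PRECONDITION & SPEC =====
-- Helpers for Pre_ only (independent of both ports): the connected same-colour group of a
-- stone, stated as the bounded closure of the neighbour relation, its distinct empty
-- neighbours, and how many two-liberty groups claim a given empty point.
def pvPreStep (bd : List (List Int)) (c : Int) (N : Nat) (S : List (Nat × Nat)) :
    List (Nat × Nat) :=
  PySem.List.dedup (S ++ S.flatMap (fun u =>
    (pvNbrs N u.1 u.2).filter (fun y => pvCell bd y.1 y.2 = c)))

def pvPreComp (bd : List (List Int)) (c : Int) (N : Nat) (s : Nat × Nat) :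
    List (Nat × Nat) :=
  (pvPreStep bd c N)^[N * N + 1] [s]

def pvPreLibs (bd : List (List Int)) (N : Nat) (S : List (Nat × Nat)) : List (Nat × Nat) :=
  PySem.List.dedup (S.flatMap (fun u =>
    (pvNbrs N u.1 u.2).filter (fun y => pvCell bd y.1 y.2 = 0)))

def pvPreCells (N : Nat) : List (Nat × Nat) :=
  (List.range N).flatMap (fun i => (List.range N).map (fun j => (i, j)))

-- a stone is its group's representative iff it is the group's first cell in scan order
def pvPreRoots (bd : List (List Int)) (c : Int) (N : Nat) : List (Nat × Nat) :=
  (pvPreCells N).filter (fun s => pvCell bd s.1 s.2 = c ∧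
    ((pvPreCells N).filter (fun t => t ∈ pvPreComp bd c N s)).head? = some s)

def pvPreCnt (bd : List (List Int)) (c : Int) (N : Nat) (q : Nat × Nat) : Nat :=
  ((pvPreRoots bd c N).filter (fun s =>
    (pvPreLibs bd N (pvPreComp bd c N s)).length = 2 ∧
    q ∈ pvPreLibs bd N (pvPreComp bd c N s))).length

-- Pre_ = exactly the inputs on which Python A returns: either the early-returned empty list,
-- or a board whose first board_size rows all carry board_size entries (else A's full scan
-- raises IndexError) on which every empty point is held by input_list at least as often as
-- two-liberty groups claim it (else some output_list.remove raises ValueError).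
def Pre_two_eyes_points_remover (input_list : List (List Int)) (input_my_stone_color : Int)
    (input_current_board : List (List Int)) : Prop :=
  input_list = [] ∨
    (input_current_board ≠ [] ∧
      (input_current_board.headD []).length ≤ input_current_board.length ∧
      (∀ i < (input_current_board.headD []).length,
        (input_current_board.headD []).length ≤ (input_current_board.getD i []).length) ∧
      (∀ q ∈ pvPreCells (input_current_board.headD []).length,
        pvCell input_current_board q.1 q.2 = 0 →
          pvPreCnt input_current_board input_my_stone_color
              (input_current_board.headD []).length q ≤
            input_list.count [(q.1 : Int), (q.2 : Int)]))
instance (input_list : List (List Int)) (input_my_stone_color : Int) (input_current_board : List (List Int)) : Decidable (Pre_two_eyes_points_remover input_list input_my_stone_color input_current_board) := by unfold Pre_two_eyes_points_remover; infer_instance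

def pvWitness_two_eyes_points_remover : List (List Int) × Int × List (List Int) :=
  ([[0, 0]], 1, [[0]])

def Spec_two_eyes_points_remover (input_list : List (List Int)) (input_my_stone_color : Int) (input_current_board : List (List Int)) (out : List (List Int)) : Prop := out = two_eyes_points_remover_alt input_list input_my_stone_color input_current_board
instance (input_list : List (List Int)) (input_my_stone_color : Int) (input_current_board : List (List Int)) (out : List (List Int)) : Decidable (Spec_two_eyes_points_remover input_list input_my_stone_color input_current_board out) := by unfold Spec_two_eyes_points_remover; infer_instance

-- ===== CLAIM (what is proved, stated in full; the proofs are below) =====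
def Claim_equal_two_eyes_points_remover : Prop := ∀ (input_list : List (List Int)) (input_my_stone_color : Int) (input_current_board : List (List Int)), Dom_two_eyes_points_remover input_list input_my_stone_color input_current_board → Pre_two_eyes_points_remover input_list input_my_stone_color input_current_board → Spec_two_eyes_points_remover input_list input_my_stone_color input_current_board (two_eyes_points_remover input_list input_my_stone_color input_current_board)

-- ===== LEMMAS AND PROOFS =====

-- generic parallel-fold simulation
lemma pvFoldl_rel {α β γ : Type} (R : α → β → Prop) (fA : α → γ → α) (fB : β → γ → β) :
    ∀ (l : List γ), (∀ x ∈ l, ∀ a b, R a b → R (fA a x) (fB b x)) →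
    ∀ a b, R a b → R (l.foldl fA a) (l.foldl fB b) := by
  intro l
  induction l with
  | nil => intro _ a b hr; exact hr
  | cons x l ih =>
    intro h a b hr
    exact ih (fun y hy => h y (by simp [hy])) _ _ (h x (by simp) a b hr)

-- pvPush basics
lemma pvPush_subset {e f : List (Nat × Nat)} {x : Nat × Nat} {cond : Prop} [Decidable cond] :
    ∀ y ∈ f, y ∈ pvPush e f x cond := by
  intro y hy; unfold pvPush; split_ifs <;> simp [hy]

lemma pvPush_self {e f : List (Nat × Nat)} {x : Nat × Nat} {cond : Prop} [Decidable cond]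
    (hc : cond) : x ∈ pvPush e f x cond ∨ x ∈ e := by
  unfold pvPush; split_ifs with h
  · exact Or.inl (by simp)
  · rcases Decidable.not_and_iff_not_or_not.mp h with h' | h'
    · exact absurd hc h'
    · rcases Decidable.not_and_iff_not_or_not.mp h' with h'' | h''
      · exact Or.inl (Decidable.not_not.mp h'')
      · exact Or.inr (Decidable.not_not.mp h'')

lemma pvPush_mono {e f : List (Nat × Nat)} {x : Nat × Nat} {cond : Prop} [Decidable cond] :
    f.length ≤ (pvPush e f x cond).length := by
  unfold pvPush; split_ifs <;> simp

lemma mem_pvPush {e f : List (Nat × Nat)} {x y : Nat × Nat} {cond : Prop} [Decidable cond]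
    (h : y ∈ pvPush e f x cond) : y ∈ f ∨ (cond ∧ y = x) := by
  unfold pvPush at h
  split_ifs at h with hc
  · rcases List.mem_append.mp h with h' | h'
    · exact Or.inl h'
    · exact Or.inr ⟨hc.1, by simpa using h'⟩
  · exact Or.inl h

lemma mem_pvPush_nil {f : List (Nat × Nat)} {x y : Nat × Nat} {cond : Prop} [Decidable cond] :
    y ∈ pvPush [] f x cond ↔ y ∈ f ∨ (cond ∧ y = x) := by
  unfold pvPush
  split_ifs with hc
  · simp only [List.mem_append, List.mem_singleton]
    constructor
    · rintro (h | h)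
      · exact Or.inl h
      · exact Or.inr ⟨hc.1, h⟩
    · rintro (h | ⟨_, h⟩)
      · exact Or.inl h
      · exact Or.inr h
  · constructor
    · exact Or.inl
    · rintro (h | ⟨h1, rfl⟩)
      · exact h
      · by_contra hy
        exact hc ⟨h1, hy, by simp⟩

lemma nodup_pvPush {e f : List (Nat × Nat)} {x : Nat × Nat} {cond : Prop} [Decidable cond]
    (h : f.Nodup) : (pvPush e f x cond).Nodup := by
  unfold pvPush
  split_ifs with hc
  · exact h.append (List.nodup_singleton x) (by simpa using hc.2.1)
  · exact h

-- distinct, in-bounds points (used only to show the fuels suffice)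
def pvGood (N : Nat) (l : List (Nat × Nat)) : Prop :=
  l.Nodup ∧ ∀ p ∈ l, p.1 < N ∧ p.2 < N

lemma pvGood_perm {N : Nat} {l l' : List (Nat × Nat)} (hp : l.Perm l') (h : pvGood N l) :
    pvGood N l' :=
  ⟨hp.nodup_iff.mp h.1, fun p hp' => h.2 p (hp.mem_iff.mpr hp')⟩

lemma pvGood_length {N : Nat} {l : List (Nat × Nat)} (h : pvGood N l) : l.length ≤ N * N := by
  classical
  have hcard : l.toFinset.card = l.length := List.toFinset_card_of_nodup h.1
  have hsub : l.toFinset ⊆ Finset.range N ×ˢ Finset.range N := by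
    intro p hp
    rcases h.2 p (List.mem_toFinset.mp hp) with ⟨h1, h2⟩
    simp [Finset.mem_product, Finset.mem_range, h1, h2]
  have := Finset.card_le_card hsub
  simpa [hcard, Finset.card_product, Finset.card_range] using this

lemma pvPush_good {N : Nat} {f e e' : List (Nat × Nat)} {x z : Nat × Nat} {cond : Prop}
    [Decidable cond]
    (hg : pvGood N (f ++ e')) (hee : ∀ y ∈ e', y ∈ e ∨ y = z)
    (hc : cond → x.1 < N ∧ x.2 < N ∧ x ≠ z) :
    pvGood N (pvPush e f x cond ++ e') := by
  unfold pvPush; split_ifs with h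
  · obtain ⟨hb1, hb2, hxz⟩ := hc h.1
    have hxe' : x ∉ e' := fun hx => ((hee x hx).elim h.2.2 hxz)
    have hperm : ((f ++ [x]) ++ e').Perm (x :: (f ++ e')) := by
      have heq : (f ++ [x]) ++ e' = f ++ (x :: e') := by simp
      rw [heq]; exact List.perm_middle
    refine pvGood_perm hperm.symm ?_
    refine ⟨List.nodup_cons.mpr ⟨?_, hg.1⟩, ?_⟩
    · simp only [List.mem_append]; rintro (hx | hx); exact h.2.1 hx; exact hxe' hx
    · intro p hp
      rcases List.mem_cons.mp hp with h' | h'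
      · subst h'; exact ⟨hb1, hb2⟩
      · exact hg.2 p h'
  · exact hg

lemma pvStepA_good {bd : List (List Int)} {c : Int} {N : Nat} {m n : Nat}
    {rest e : List (Nat × Nat)} (h : pvGood N (((m, n) :: rest) ++ e)) :
    pvGood N (pvStepA bd c N m n rest e ++ (e ++ [(m, n)])) := by
  have hmn : m < N ∧ n < N := h.2 (m, n) (by simp)
  have h0 : pvGood N (rest ++ (e ++ [(m, n)])) := by
    have h1 : pvGood N ((rest ++ e) ++ [(m, n)]) :=
      pvGood_perm (List.perm_append_singleton _ _).symm (by simpa using h)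
    simpa [List.append_assoc] using h1
  have hee : ∀ y ∈ e ++ [(m, n)], y ∈ e ∨ y = (m, n) := by intro y hy; simpa using hy
  refine pvPush_good (pvPush_good (pvPush_good (pvPush_good h0 hee ?_) hee ?_) hee ?_) hee ?_
  · rintro ⟨h1, _⟩; exact ⟨h1, hmn.2, by simp [Prod.ext_iff]⟩
  · rintro ⟨h1, _⟩; exact ⟨by omega, hmn.2, by simp [Prod.ext_iff]; omega⟩
  · rintro ⟨h1, _⟩; exact ⟨hmn.1, h1, by simp [Prod.ext_iff]⟩
  · rintro ⟨h1, _⟩; exact ⟨hmn.1, by omega, by simp [Prod.ext_iff]; omega⟩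

lemma pvStepA_mono {bd : List (List Int)} {c : Int} {N : Nat} {m n : Nat}
    {rest e : List (Nat × Nat)} : rest.length ≤ (pvStepA bd c N m n rest e).length :=
  le_trans (le_trans (le_trans pvPush_mono pvPush_mono) pvPush_mono) pvPush_mono

lemma pvGood_seed {N i j : Nat} (hi : i < N) (hj : j < N) :
    pvGood N ([(i, j)] ++ []) := by
  refine ⟨by simp, ?_⟩
  intro p hp; simp at hp; subst hp; exact ⟨hi, hj⟩

-- with at least 5·(N²+1−|state|)+|frontier| fuel, A's BFS drains its frontier
lemma pvLoopA_stops {bd : List (List Int)} {c : Int} {N : Nat} :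
    ∀ (fuel : Nat) (f e : List (Nat × Nat)), pvGood N (f ++ e) →
      5 * (N * N + 1 - (f.length + e.length)) + f.length ≤ fuel →
      (pvLoopA bd c N fuel f e).1 = [] := by
  intro fuel
  induction fuel with
  | zero =>
    intro f e _ hm
    have hf : f.length = 0 := by omega
    rw [List.length_eq_zero_iff.mp hf]
    rfl
  | succ fuel ih =>
    intro f e hg hm
    match f with
    | [] => rfl
    | (m, n) :: rest =>
      show (pvLoopA bd c N fuel (pvStepA bd c N m n rest e) (e ++ [(m, n)])).1 = []
      apply ih _ _ (pvStepA_good hg)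
      have h1 := pvGood_length (pvStepA_good (bd := bd) (c := c) hg)
      have h2 := pvStepA_mono (bd := bd) (c := c) (N := N) (m := m) (n := n)
        (rest := rest) (e := e)
      simp only [List.length_append, List.length_cons] at h1 hm ⊢
      omega

lemma mem_pvNbrs {N m n : Nat} {y : Nat × Nat} :
    y ∈ pvNbrs N m n ↔
      (m+1 < N ∧ n < N ∧ y = (m+1, n)) ∨ (1 ≤ m ∧ m-1 < N ∧ n < N ∧ y = (m-1, n)) ∨
      (m < N ∧ n+1 < N ∧ y = (m, n+1)) ∨ (m < N ∧ 1 ≤ n ∧ n-1 < N ∧ y = (m, n-1)) := by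
  unfold pvNbrs
  simp only [List.mem_append]
  constructor
  · rintro (((h | h) | h) | h) <;> split_ifs at h <;> simp_all
  · rintro (⟨h1, h2, rfl⟩ | ⟨h1, h2, h3, rfl⟩ | ⟨h1, h2, rfl⟩ | ⟨h1, h2, h3, rfl⟩) <;>
      split_ifs <;> simp_all

lemma pvNbrs_bounds {N m n : Nat} {y : Nat × Nat} (h : y ∈ pvNbrs N m n) :
    y.1 < N ∧ y.2 < N := by
  rcases mem_pvNbrs.mp h with ⟨_, _, rfl⟩ | ⟨_, _, _, rfl⟩ | ⟨_, _, rfl⟩ | ⟨_, _, _, rfl⟩ <;>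
    exact ⟨by simp_all, by simp_all⟩

-- reachability through same-coloured cells: the semantic notion of A's group / B's component
def pvReach (bd : List (List Int)) (c : Int) (N : Nat) (s x : Nat × Nat) : Prop :=
  Relation.ReflTransGen (fun u v => v ∈ pvNbrs N u.1 u.2 ∧ pvCell bd v.1 v.2 = c) s x

-- the new frontier holds at most rest plus same-coloured neighbours of the popped stone
lemma mem_pvStepA {bd : List (List Int)} {c : Int} {N m n : Nat}
    {rest e : List (Nat × Nat)} {x : Nat × Nat} (hm : m < N) (hn : n < N)
    (h : x ∈ pvStepA bd c N m n rest e) :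
    x ∈ rest ∨ (x ∈ pvNbrs N m n ∧ pvCell bd x.1 x.2 = c) := by
  unfold pvStepA at h
  rcases mem_pvPush h with h | ⟨hc, rfl⟩
  rcases mem_pvPush h with h | ⟨hc, rfl⟩
  rcases mem_pvPush h with h | ⟨hc, rfl⟩
  rcases mem_pvPush h with h | ⟨hc, rfl⟩
  · exact Or.inl h
  · exact Or.inr ⟨mem_pvNbrs.mpr (Or.inl ⟨hc.1, hn, rfl⟩), hc.2⟩
  · exact Or.inr ⟨mem_pvNbrs.mpr (Or.inr (Or.inl ⟨hc.1, by omega, hn, rfl⟩)), hc.2⟩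
  · exact Or.inr ⟨mem_pvNbrs.mpr (Or.inr (Or.inr (Or.inl ⟨hm, hc.1, rfl⟩))), hc.2⟩
  · exact Or.inr ⟨mem_pvNbrs.mpr (Or.inr (Or.inr (Or.inr ⟨hm, hc.1, by omega, rfl⟩))), hc.2⟩

-- every same-coloured neighbour of the popped stone lands in the new frontier or was expanded
lemma closure_pvStepA {bd : List (List Int)} {c : Int} {N m n : Nat}
    {rest e : List (Nat × Nat)} :
    ∀ y ∈ pvNbrs N m n, pvCell bd y.1 y.2 = c →
      y ∈ pvStepA bd c N m n rest e ∨ y ∈ e := by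
  intro y hy hcy
  rw [mem_pvNbrs] at hy
  unfold pvStepA
  rcases hy with ⟨hb1, hb2, rfl⟩ | ⟨hb1, hb2, hb3, rfl⟩ | ⟨hb1, hb2, rfl⟩ | ⟨hb1, hb2, hb3, rfl⟩
  · rcases pvPush_self (e := e) (f := rest) (x := (m+1, n))
      (cond := (m+1 < N) ∧ pvCell bd (m+1) n = c) ⟨hb1, hcy⟩ with h | h
    · exact Or.inl (pvPush_subset _ (pvPush_subset _ (pvPush_subset _ h)))
    · exact Or.inr h
  · rcases pvPush_self (e := e)
      (f := pvPush e rest (m+1, n) ((m+1 < N) ∧ pvCell bd (m+1) n = c)) (x := (m-1, n))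
      (cond := (1 ≤ m) ∧ pvCell bd (m-1) n = c) ⟨hb1, hcy⟩ with h | h
    · exact Or.inl (pvPush_subset _ (pvPush_subset _ h))
    · exact Or.inr h
  · rcases pvPush_self (e := e)
      (f := pvPush e (pvPush e rest (m+1, n) ((m+1 < N) ∧ pvCell bd (m+1) n = c)) (m-1, n)
        ((1 ≤ m) ∧ pvCell bd (m-1) n = c)) (x := (m, n+1))
      (cond := (n+1 < N) ∧ pvCell bd m (n+1) = c) ⟨hb2, hcy⟩ with h | h
    · exact Or.inl (pvPush_subset _ h)
    · exact Or.inr h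
  · rcases pvPush_self (e := e)
      (f := pvPush e (pvPush e (pvPush e rest (m+1, n) ((m+1 < N) ∧ pvCell bd (m+1) n = c))
        (m-1, n) ((1 ≤ m) ∧ pvCell bd (m-1) n = c)) (m, n+1)
        ((n+1 < N) ∧ pvCell bd m (n+1) = c)) (x := (m, n-1))
      (cond := (1 ≤ n) ∧ pvCell bd m (n-1) = c) ⟨hb2, hcy⟩ with h | h
    · exact Or.inl h
    · exact Or.inr h

-- invariants of A's BFS: elements are preserved, stay reachable same-coloured in-bounds
-- cells, and expanded stones keep their same-coloured neighbours inside the state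
lemma pvLoopA_inv {bd : List (List Int)} {c : Int} {N : Nat} {s : Nat × Nat} :
    ∀ (fuel : Nat) (f e : List (Nat × Nat)),
      (∀ x ∈ f ++ e, pvCell bd x.1 x.2 = c ∧ pvReach bd c N s x ∧ x.1 < N ∧ x.2 < N) →
      (∀ x ∈ e, ∀ y ∈ pvNbrs N x.1 x.2, pvCell bd y.1 y.2 = c → y ∈ f ++ e) →
      (∀ x ∈ f ++ e, x ∈ (pvLoopA bd c N fuel f e).1 ++ (pvLoopA bd c N fuel f e).2) ∧
      (∀ x ∈ (pvLoopA bd c N fuel f e).1 ++ (pvLoopA bd c N fuel f e).2,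
        pvCell bd x.1 x.2 = c ∧ pvReach bd c N s x ∧ x.1 < N ∧ x.2 < N) ∧
      (∀ x ∈ (pvLoopA bd c N fuel f e).2, ∀ y ∈ pvNbrs N x.1 x.2,
        pvCell bd y.1 y.2 = c → y ∈ (pvLoopA bd c N fuel f e).1 ++ (pvLoopA bd c N fuel f e).2) := by
  intro fuel
  induction fuel with
  | zero =>
    intro f e hP hcl
    exact ⟨fun x hx => hx, hP, hcl⟩
  | succ fuel ih =>
    intro f e hP hcl
    match f with
    | [] =>
      refine ⟨fun x hx => hx, hP, ?_⟩
      intro x hx y hy hcy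
      exact hcl x hx y hy hcy
    | (m, n) :: rest =>
      have hmn := hP (m, n) (by simp)
      have hrest_sub : ∀ y ∈ rest, y ∈ pvStepA bd c N m n rest e := by
        intro y hy
        exact pvPush_subset _ (pvPush_subset _ (pvPush_subset _ (pvPush_subset _ hy)))
      have hP1 : ∀ x ∈ pvStepA bd c N m n rest e ++ (e ++ [(m, n)]),
          pvCell bd x.1 x.2 = c ∧ pvReach bd c N s x ∧ x.1 < N ∧ x.2 < N := by
        intro x hx
        rcases List.mem_append.mp hx with hx | hx
        · rcases mem_pvStepA hmn.2.2.1 hmn.2.2.2 hx with hx' | ⟨hnb, hcx⟩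
          · exact hP x (by simp [hx'])
          · exact ⟨hcx, hmn.2.1.tail ⟨hnb, hcx⟩, pvNbrs_bounds hnb⟩
        · rcases List.mem_append.mp hx with hx' | hx'
          · exact hP x (by simp [hx'])
          · simp at hx'; subst hx'; exact hmn
      have hcl1 : ∀ x ∈ e ++ [(m, n)], ∀ y ∈ pvNbrs N x.1 x.2,
          pvCell bd y.1 y.2 = c → y ∈ pvStepA bd c N m n rest e ++ (e ++ [(m, n)]) := by
        intro x hx y hy hcy
        rcases List.mem_append.mp hx with hx' | hx'
        · rcases List.mem_append.mp (hcl x hx' y hy hcy) with h' | h'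
          · rcases List.mem_cons.mp h' with h'' | h''
            · subst h''; simp
            · exact List.mem_append.mpr (Or.inl (hrest_sub y h''))
          · simp [h']
        · simp at hx'; subst hx'
          rcases closure_pvStepA y hy hcy with h' | h'
          · exact List.mem_append.mpr (Or.inl h')
          · simp [h']
      obtain ⟨ih1, ih2, ih3⟩ := ih (pvStepA bd c N m n rest e) (e ++ [(m, n)]) hP1 hcl1
      have hred : pvLoopA bd c N (fuel + 1) ((m, n) :: rest) e =
          pvLoopA bd c N fuel (pvStepA bd c N m n rest e) (e ++ [(m, n)]) := rfl
      rw [hred]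
      refine ⟨?_, ih2, ih3⟩
      intro x hx
      apply ih1
      rcases List.mem_append.mp hx with hx' | hx'
      · rcases List.mem_cons.mp hx' with h'' | h''
        · subst h''; simp
        · exact List.mem_append.mpr (Or.inl (hrest_sub x h''))
      · simp [hx']

-- A's expanded list for a seed is exactly the seed's reachable set
lemma pvLoopA_component {bd : List (List Int)} {c : Int} {N : Nat} {i j : Nat}
    (hi : i < N) (hj : j < N) (hc : pvCell bd i j = c) :
    (∀ x ∈ (pvLoopA bd c N (5 * (N * N + 1)) [(i, j)] []).2, x.1 < N ∧ x.2 < N) ∧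
    (∀ x, x ∈ (pvLoopA bd c N (5 * (N * N + 1)) [(i, j)] []).2 ↔ pvReach bd c N (i, j) x) := by
  have hstop : (pvLoopA bd c N (5 * (N * N + 1)) [(i, j)] []).1 = [] := by
    apply pvLoopA_stops _ _ _ (pvGood_seed hi hj)
    simp only [List.length_singleton, List.length_nil]
    omega
  obtain ⟨h1, h2, h3⟩ := pvLoopA_inv (bd := bd) (c := c) (N := N) (s := (i, j))
    (5 * (N * N + 1)) [(i, j)] []
    (by intro x hx; simp at hx; subst hx
        exact ⟨hc, Relation.ReflTransGen.refl, hi, hj⟩)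
    (by intro x hx; simp at hx)
  rw [hstop] at h1 h2 h3
  simp only [List.nil_append] at h1 h2 h3
  refine ⟨fun x hx => (h2 x hx).2.2, fun x => ⟨fun hx => (h2 x hx).2.1, ?_⟩⟩
  intro hx
  induction hx with
  | refl => exact h1 (i, j) (by simp)
  | tail hab hbc ih => exact h3 _ ih _ hbc.1 hbc.2

-- A's empty-neighbour scan, one member
lemma mem_pvEyesStepA {bd : List (List Int)} {N : Nat} {acc : List (Nat × Nat)}
    {u x : Nat × Nat} (hu1 : u.1 < N) (hu2 : u.2 < N) :
    x ∈ pvEyesStepA bd N acc u ↔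
      x ∈ acc ∨ (x ∈ pvNbrs N u.1 u.2 ∧ pvCell bd x.1 x.2 = 0) := by
  unfold pvEyesStepA
  simp only [mem_pvPush_nil]
  constructor
  · rintro (((((h | ⟨hc, rfl⟩) | ⟨hc, rfl⟩) | ⟨hc, rfl⟩) | ⟨hc, rfl⟩))
    · exact Or.inl h
    · exact Or.inr ⟨mem_pvNbrs.mpr (Or.inl ⟨hc.1, hu2, rfl⟩), hc.2⟩
    · exact Or.inr ⟨mem_pvNbrs.mpr (Or.inr (Or.inl ⟨hc.1, by omega, hu2, rfl⟩)), hc.2⟩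
    · exact Or.inr ⟨mem_pvNbrs.mpr (Or.inr (Or.inr (Or.inl ⟨hu1, hc.1, rfl⟩))), hc.2⟩
    · exact Or.inr ⟨mem_pvNbrs.mpr (Or.inr (Or.inr (Or.inr ⟨hu1, hc.1, by omega, rfl⟩))), hc.2⟩
  · rintro (h | ⟨hnb, hcx⟩)
    · exact Or.inl (Or.inl (Or.inl (Or.inl h)))
    · rcases mem_pvNbrs.mp hnb with ⟨h1, h2, rfl⟩ | ⟨h1, h2, h3, rfl⟩ | ⟨h1, h2, rfl⟩ | ⟨h1, h2, h3, rfl⟩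
      · exact Or.inl (Or.inl (Or.inl (Or.inr ⟨⟨h1, hcx⟩, rfl⟩)))
      · exact Or.inl (Or.inl (Or.inr ⟨⟨h1, hcx⟩, rfl⟩))
      · exact Or.inl (Or.inr ⟨⟨h2, hcx⟩, rfl⟩)
      · exact Or.inr ⟨⟨h2, hcx⟩, rfl⟩

lemma nodup_pvEyesStepA {bd : List (List Int)} {N : Nat} {acc : List (Nat × Nat)}
    {u : Nat × Nat} (h : acc.Nodup) : (pvEyesStepA bd N acc u).Nodup :=
  nodup_pvPush (nodup_pvPush (nodup_pvPush (nodup_pvPush h)))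

-- A's eye list of a group: distinct in-bounds empty neighbours of the group's members
lemma pvEyes_char {bd : List (List Int)} {N : Nat} :
    ∀ (g : List (Nat × Nat)) (acc : List (Nat × Nat)),
      (∀ u ∈ g, u.1 < N ∧ u.2 < N) → acc.Nodup →
      (g.foldl (pvEyesStepA bd N) acc).Nodup ∧
      (∀ x, x ∈ g.foldl (pvEyesStepA bd N) acc ↔
        x ∈ acc ∨ ∃ u ∈ g, x ∈ pvNbrs N u.1 u.2 ∧ pvCell bd x.1 x.2 = 0) := by
  intro g
  induction g with
  | nil => intro acc _ hnd; exact ⟨hnd, by simp⟩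
  | cons u g ih =>
    intro acc hb hnd
    have hu := hb u (by simp)
    obtain ⟨ihn, ihm⟩ := ih (pvEyesStepA bd N acc u)
      (fun v hv => hb v (by simp [hv])) (nodup_pvEyesStepA hnd)
    refine ⟨ihn, ?_⟩
    intro x
    rw [List.foldl_cons, ihm x, mem_pvEyesStepA hu.1 hu.2]
    simp only [List.mem_cons]
    constructor
    · rintro ((h | h) | ⟨v, hv, h⟩)
      · exact Or.inl h
      · exact Or.inr ⟨u, Or.inl rfl, h⟩
      · exact Or.inr ⟨v, Or.inr hv, h⟩
    · rintro (h | ⟨v, (rfl | hv), h⟩)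
      · exact Or.inl (Or.inl h)
      · exact Or.inl (Or.inr h)
      · exact Or.inr ⟨v, hv, h⟩

-- B's guarded Set.add folds (pvGrow / pvLibs)
lemma mem_pvGuardFold {bd : List (List Int)} {v : Int} :
    ∀ (l : List (Nat × Nat)) (s : List (Nat × Nat)) (x : Nat × Nat),
      (x ∈ l.foldl (fun s y => if pvCell bd y.1 y.2 = v then PySem.Set.add s y else s) s ↔
        x ∈ s ∨ (x ∈ l ∧ pvCell bd x.1 x.2 = v)) := by
  intro l
  induction l with
  | nil => intro s x; simp
  | cons y l ih =>
    intro s x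
    rw [List.foldl_cons]
    by_cases hy : pvCell bd y.1 y.2 = v
    · rw [if_pos hy, ih, PySem.Set.mem_add]
      simp only [List.mem_cons]
      constructor
      · rintro ((h | rfl) | ⟨h1, h2⟩)
        · exact Or.inl h
        · exact Or.inr ⟨Or.inl rfl, hy⟩
        · exact Or.inr ⟨Or.inr h1, h2⟩
      · rintro (h | ⟨(rfl | h1), h2⟩)
        · exact Or.inl (Or.inl h)
        · exact Or.inl (Or.inr rfl)
        · exact Or.inr ⟨h1, h2⟩
    · rw [if_neg hy, ih]
      simp only [List.mem_cons]
      constructor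
      · rintro (h | ⟨h1, h2⟩)
        · exact Or.inl h
        · exact Or.inr ⟨Or.inr h1, h2⟩
      · rintro (h | ⟨(rfl | h1), h2⟩)
        · exact Or.inl h
        · exact absurd h2 hy
        · exact Or.inr ⟨h1, h2⟩

lemma nodup_pvGuardFold {bd : List (List Int)} {v : Int} :
    ∀ (l : List (Nat × Nat)) (s : List (Nat × Nat)), s.Nodup →
      (l.foldl (fun s y => if pvCell bd y.1 y.2 = v then PySem.Set.add s y else s) s).Nodup := by
  intro l
  induction l with
  | nil => intro s h; exact h
  | cons y l ih =>
    intro s h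
    rw [List.foldl_cons]
    by_cases hy : pvCell bd y.1 y.2 = v
    · rw [if_pos hy]; exact ih _ (PySem.Set.nodup_add _ _ h)
    · rw [if_neg hy]; exact ih _ h

lemma mem_pvNbrFold {bd : List (List Int)} {v : Int} {N : Nat} :
    ∀ (l : List (Nat × Nat)) (s : List (Nat × Nat)) (x : Nat × Nat),
      (x ∈ l.foldl (fun s u =>
          (pvNbrs N u.1 u.2).foldl (fun s y =>
            if pvCell bd y.1 y.2 = v then PySem.Set.add s y else s) s) s ↔
        x ∈ s ∨ ∃ u ∈ l, x ∈ pvNbrs N u.1 u.2 ∧ pvCell bd x.1 x.2 = v) := by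
  intro l
  induction l with
  | nil => intro s x; simp
  | cons u l ih =>
    intro s x
    rw [List.foldl_cons, ih, mem_pvGuardFold]
    simp only [List.mem_cons]
    constructor
    · rintro ((h | h) | ⟨w, hw, h⟩)
      · exact Or.inl h
      · exact Or.inr ⟨u, Or.inl rfl, h⟩
      · exact Or.inr ⟨w, Or.inr hw, h⟩
    · rintro (h | ⟨w, (rfl | hw), h⟩)
      · exact Or.inl (Or.inl h)
      · exact Or.inl (Or.inr h)
      · exact Or.inr ⟨w, hw, h⟩

lemma nodup_pvNbrFold {bd : List (List Int)} {v : Int} {N : Nat} :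
    ∀ (l : List (Nat × Nat)) (s : List (Nat × Nat)), s.Nodup →
      (l.foldl (fun s u =>
        (pvNbrs N u.1 u.2).foldl (fun s y =>
          if pvCell bd y.1 y.2 = v then PySem.Set.add s y else s) s) s).Nodup := by
  intro l
  induction l with
  | nil => intro s h; exact h
  | cons u l ih => intro s h; exact ih _ (nodup_pvGuardFold _ _ h)

lemma mem_pvGrow {bd : List (List Int)} {c : Int} {N : Nat} {comp : List (Nat × Nat)}
    {x : Nat × Nat} :
    x ∈ pvGrow bd c N comp ↔
      x ∈ comp ∨ ∃ u ∈ comp, x ∈ pvNbrs N u.1 u.2 ∧ pvCell bd x.1 x.2 = c :=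
  mem_pvNbrFold comp comp x

lemma mem_pvLibs {bd : List (List Int)} {N : Nat} {comp : List (Nat × Nat)} {x : Nat × Nat} :
    x ∈ pvLibs bd N comp ↔ ∃ u ∈ comp, x ∈ pvNbrs N u.1 u.2 ∧ pvCell bd x.1 x.2 = 0 := by
  rw [pvLibs, mem_pvNbrFold]
  simp

lemma nodup_pvLibs {bd : List (List Int)} {N : Nat} {comp : List (Nat × Nat)} :
    (pvLibs bd N comp).Nodup :=
  nodup_pvNbrFold comp [] (by simp)

-- B's saturation from a seed computes exactly the seed's reachable set
lemma pvSat_component {bd : List (List Int)} {c : Int} {N : Nat} {s : Nat × Nat} :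
    ∀ (fuel : Nat) (comp : List (Nat × Nat)), comp.Nodup →
      (∀ x ∈ comp, x.1 < N ∧ x.2 < N) → s ∈ comp →
      (∀ x ∈ comp, pvReach bd c N s x) → N * N + 1 ≤ fuel + comp.length →
      (pvSat bd c N fuel comp).Nodup ∧
      (∀ x ∈ pvSat bd c N fuel comp, x.1 < N ∧ x.2 < N) ∧
      (∀ x, x ∈ pvSat bd c N fuel comp ↔ pvReach bd c N s x) := by
  intro fuel
  induction fuel with
  | zero =>
    intro comp hnd hb _ _ hfuel
    have := pvGood_length (N := N) ⟨hnd, hb⟩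
    omega
  | succ fuel ih =>
    intro comp hnd hb hs hr hfuel
    have hsub : comp ⊆ pvGrow bd c N comp := fun x hx => mem_pvGrow.mpr (Or.inl hx)
    have hndg : (pvGrow bd c N comp).Nodup := nodup_pvNbrFold comp comp hnd
    have hlen : comp.length ≤ (pvGrow bd c N comp).length := (hnd.subperm hsub).length_le
    by_cases hfix : (pvGrow bd c N comp).length = comp.length
    · have hred : pvSat bd c N (fuel + 1) comp = comp := by
        simp [pvSat, hfix]
      rw [hred]
      have hperm : comp.Perm (pvGrow bd c N comp) :=
        (hnd.subperm hsub).perm_of_length_le (by omega)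
      have hclosed : ∀ u ∈ comp, ∀ y ∈ pvNbrs N u.1 u.2, pvCell bd y.1 y.2 = c → y ∈ comp := by
        intro u hu y hy hcy
        exact hperm.mem_iff.mpr (mem_pvGrow.mpr (Or.inr ⟨u, hu, hy, hcy⟩))
      refine ⟨hnd, hb, fun x => ⟨hr x, ?_⟩⟩
      intro hx
      induction hx with
      | refl => exact hs
      | tail hab hbc ihr => exact hclosed _ ihr _ hbc.1 hbc.2
    · have hred : pvSat bd c N (fuel + 1) comp = pvSat bd c N fuel (pvGrow bd c N comp) := by
        simp [pvSat, hfix]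
      rw [hred]
      refine ih (pvGrow bd c N comp) hndg ?_ (hsub hs) ?_ (by omega)
      · intro x hx
        rcases mem_pvGrow.mp hx with h | ⟨u, _, hnb, _⟩
        · exact hb x h
        · exact pvNbrs_bounds hnb
      · intro x hx
        rcases mem_pvGrow.mp hx with h | ⟨u, hu, hnb, hcx⟩
        · exact hr x h
        · exact (hr u hu).tail ⟨hnb, hcx⟩

-- first-occurrence removals for (possibly equal) values commute
lemma pvRem_eq (l : List (List Int)) (v : List Int) :
    pvRem l v = if v ∈ l then l.erase v else l := by
  unfold pvRem
  by_cases h : v ∈ l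
  · rw [PySem.List.remove?_eq_some_erase _ _ h, if_pos h]; rfl
  · rw [(PySem.List.remove?_eq_none_iff l v).mpr h, if_neg h]; rfl

lemma pvRem_comm (l : List (List Int)) (a b : List Int) :
    pvRem (pvRem l a) b = pvRem (pvRem l b) a := by
  by_cases hab : a = b
  · subst hab; rfl
  simp only [pvRem_eq]
  by_cases ha : a ∈ l <;> by_cases hb : b ∈ l
  · rw [if_pos ha, if_pos ((List.mem_erase_of_ne (Ne.symm hab)).mpr hb),
      if_pos hb, if_pos ((List.mem_erase_of_ne hab).mpr ha), List.erase_comm]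
  · rw [if_pos ha, if_neg (fun h => hb (List.mem_of_mem_erase h)), if_neg hb, if_pos ha]
  · rw [if_neg ha, if_pos hb, if_neg (fun h => ha (List.mem_of_mem_erase h))]
  · simp [ha, hb]

-- A's per-group eye list and removal contribution
def pvEyesOf (bd : List (List Int)) (N : Nat) (g : List (Nat × Nat)) : List (Nat × Nat) :=
  g.foldl (pvEyesStepA bd N) []

def pvDelta (bd : List (List Int)) (N : Nat) (g : List (Nat × Nat)) : List (Nat × Nat) :=
  if (pvEyesOf bd N g).length = 2 then pvEyesOf bd N g else []

-- A's removal phase is the fold of single removals over the concatenated eye pairs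
lemma pvRemoval_phase (bd : List (List Int)) (N : Nat) :
    ∀ (gs : List (List (Nat × Nat))) (l : List (List Int)),
      gs.foldl (fun out g =>
        let eyes := g.foldl (pvEyesStepA bd N) []
        if eyes.length = 2 then
          let e0 := eyes.getD 0 (0, 0)
          let e1 := eyes.getD 1 (0, 0)
          pvRem (pvRem out [(e0.1 : Int), (e0.2 : Int)]) [(e1.1 : Int), (e1.2 : Int)]
        else out) l
      = (gs.flatMap (pvDelta bd N)).foldl
          (fun out x => pvRem out [(x.1 : Int), (x.2 : Int)]) l := by
  intro gs
  induction gs with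
  | nil => intro l; simp
  | cons g gs ih =>
    intro l
    rw [List.foldl_cons, List.flatMap_cons, List.foldl_append, ih]
    congr 1
    show (if (pvEyesOf bd N g).length = 2 then _ else l) = _
    unfold pvDelta
    by_cases h2 : (pvEyesOf bd N g).length = 2
    · obtain ⟨a, b, hab⟩ := List.length_eq_two.mp h2
      rw [if_pos h2, if_pos h2]
      have hab2 : List.foldl (pvEyesStepA bd N) [] g = [a, b] := hab
      rw [hab, hab2]
      simp
    · rw [if_neg h2, if_neg h2]
      simp

lemma pvIsInGroups_eq {gs : List (List (Nat × Nat))} {x : Nat × Nat} :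
    pvIsInGroups gs x = true ↔ ∃ g ∈ gs, x ∈ g := by
  simp [pvIsInGroups, List.any_eq_true]

-- simulation relation between A's group list and B's (assigned, removals) state:
-- same stones assigned, and B's removal list a permutation of A's eye pairs
def pvRel2 (bd : List (List Int)) (N : Nat) (gs : List (List (Nat × Nat)))
    (st : List (Nat × Nat) × List (Nat × Nat)) : Prop :=
  (∀ y, y ∈ st.1 ↔ ∃ g ∈ gs, y ∈ g) ∧ (gs.flatMap (pvDelta bd N)).Perm st.2

lemma pvSeed_step2 {bd : List (List Int)} {c : Int} {N : Nat} (i j : Nat)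
    (hi : i < N) (hj : j < N) (gs : List (List (Nat × Nat)))
    (st : List (Nat × Nat) × List (Nat × Nat)) (h : pvRel2 bd N gs st) :
    pvRel2 bd N
      (if pvCell bd i j = c ∧ pvIsInGroups gs (i, j) = false then
        gs ++ [(pvLoopA bd c N (5 * (N * N + 1)) [(i, j)] []).2]
      else gs)
      (pvSeedB bd c N i j st) := by
  obtain ⟨h1, h2⟩ := h
  have hcond : (pvCell bd i j = c ∧ pvIsInGroups gs (i, j) = false) ↔
      (pvCell bd i j = c ∧ (i, j) ∉ st.1) := by
    constructor
    · rintro ⟨hc, hg⟩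
      refine ⟨hc, fun hv => ?_⟩
      rw [h1] at hv
      rw [← pvIsInGroups_eq] at hv
      rw [hg] at hv
      exact Bool.false_ne_true hv
    · rintro ⟨hc, hv⟩
      refine ⟨hc, ?_⟩
      by_contra hg
      rw [Bool.not_eq_false, pvIsInGroups_eq] at hg
      exact hv ((h1 _).mpr hg)
  by_cases hA : pvCell bd i j = c ∧ pvIsInGroups gs (i, j) = false
  · obtain ⟨hc, hnin⟩ := hcond.mp hA
    rw [if_pos hA]
    unfold pvSeedB
    rw [if_pos (hcond.mp hA)]
    set g := (pvLoopA bd c N (5 * (N * N + 1)) [(i, j)] []).2 with hgdef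
    set comp := pvSat bd c N (N * N + 1) [(i, j)] with hcompdef
    obtain ⟨hgb, hgm⟩ := pvLoopA_component (bd := bd) hi hj hc
    obtain ⟨hcn, hcb, hcm⟩ := pvSat_component (bd := bd) (c := c) (N := N) (s := (i, j))
      (N * N + 1) [(i, j)] (by simp)
      (by intro x hx; simp at hx; subst hx; exact ⟨hi, hj⟩)
      (by simp)
      (by intro x hx; simp at hx; subst hx; exact Relation.ReflTransGen.refl)
      (by simp)
    have hgc : ∀ x, x ∈ g ↔ x ∈ comp := by
      intro x; rw [hgm x, hcm x]
    obtain ⟨hen, hem⟩ := pvEyes_char g [] hgb (by simp)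
    have heyes : ∀ x, x ∈ pvEyesOf bd N g ↔ x ∈ pvLibs bd N comp := by
      intro x
      rw [pvEyesOf, hem x, mem_pvLibs]
      simp only [List.not_mem_nil, false_or]
      constructor
      · rintro ⟨u, hu, hx⟩; exact ⟨u, (hgc u).mp hu, hx⟩
      · rintro ⟨u, hu, hx⟩; exact ⟨u, (hgc u).mpr hu, hx⟩
    have hpe : (pvEyesOf bd N g).Perm (pvLibs bd N comp) :=
      (List.perm_ext_iff_of_nodup hen nodup_pvLibs).mpr heyes
    have hsort : (PySem.List.sorted2 (pvLibs bd N comp) (fun x => x.1) (fun x => x.2)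
        false).Perm (pvLibs bd N comp) :=
      PySem.List.sorted2_perm _ _ _ false
    constructor
    · intro y
      rw [PySem.Set.mem_update, h1 y]
      simp only [List.mem_append, List.mem_singleton]
      constructor
      · rintro (⟨g', hg', hy⟩ | hy)
        · exact ⟨g', Or.inl hg', hy⟩
        · exact ⟨g, Or.inr rfl, (hgc y).mpr hy⟩
      · rintro ⟨g', (hg' | rfl), hy⟩
        · exact Or.inl ⟨g', hg', hy⟩
        · exact Or.inr ((hgc y).mp hy)
    · show (List.flatMap (pvDelta bd N) (gs ++ [g])).Perm _
      rw [List.flatMap_append]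
      simp only [List.flatMap_cons, List.flatMap_nil, List.append_nil]
      have hlen : (pvEyesOf bd N g).length = (pvLibs bd N comp).length := hpe.length_eq
      unfold pvDelta
      by_cases hl2 : (pvLibs bd N comp).length = 2
      · rw [if_pos (by omega), if_pos hl2]
        exact h2.append (hpe.trans hsort.symm)
      · rw [if_neg (by omega), if_neg hl2]
        simpa using h2
  · rw [if_neg hA]
    unfold pvSeedB
    rw [if_neg (fun hx => hA (hcond.mpr hx))]
    exact ⟨h1, h2⟩

lemma pvOuter2 (bd : List (List Int)) (c : Int) (N : Nat) :
    pvRel2 bd N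
      ((List.range N).foldl (fun gs i =>
        (List.range N).foldl (fun gs j =>
          if pvCell bd i j = c ∧ pvIsInGroups gs (i, j) = false then
            gs ++ [(pvLoopA bd c N (5 * (N * N + 1)) [(i, j)] []).2]
          else gs) gs) [])
      ((List.range N).foldl (fun st i =>
        (List.range N).foldl (fun st j => pvSeedB bd c N i j st) st) ([], [])) := by
  refine pvFoldl_rel (pvRel2 bd N) _ _ _ ?_ _ _ ?_
  · intro i hi gs st h
    refine pvFoldl_rel (pvRel2 bd N) _ _ _ ?_ _ _ h
    intro j hj gs st h
    exact pvSeed_step2 i j (List.mem_range.mp hi) (List.mem_range.mp hj) gs st h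
  · exact ⟨by simp, by simp⟩

theorem pv_main : ∀ (l : List (List Int)) (c : Int) (bd : List (List Int)),
    two_eyes_points_remover l c bd = two_eyes_points_remover_alt l c bd := by
  intro l c bd
  unfold two_eyes_points_remover two_eyes_points_remover_alt
  by_cases hl : l.length = 0
  · rw [if_pos hl, if_pos hl]
  · rw [if_neg hl, if_neg hl]
    dsimp only
    obtain ⟨h1, h2⟩ := pvOuter2 bd c ((bd.headD []).length)
    rw [pvGroupsFinder, pvRemoval_phase]
    exact h2.foldl_eq' (fun x _ y _ z => pvRem_comm z _ _) l

-- ===== VERDICT (by name: the statement is the Claim_ definition above) =====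
theorem two_eyes_points_remover_spec : Claim_equal_two_eyes_points_remover := by
  intro l c bd _ _
  unfold Spec_two_eyes_points_remover
  exact pv_main l c bd
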